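-- pv_equiv track=rewrite | github.com/Madhan-2213/desktop-tutorial | swap_and_append.py | create_new_string
-- ===== SOURCE A (Python) =====
-- def create_new_string(s1, s2):
--     s3 = ""
--
--     len_s1 = len(s1)
--     len_s2 = len(s2)
--
--     max_len = max(len_s1, len_s2)
--
--     for i in range(max_len):
--         if i < len_s1:
--             s3 += s1[i]
--         if i < len_s2:
--             s3 += s2[-(i + 1)]
--     return s3
-- ===== SOURCE B (Python) =====
-- def create_new_string(s1, s2):
--     # closed-form: output position p -> source character, no sequential pass over either string
--     n1, n2 = len(s1), len(s2)
--     m = min(n1, n2)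
--
--     def ch(p):
--         if p < 2 * m:
--             return s1[p // 2] if p % 2 == 0 else s2[n2 - 1 - p // 2]
--         return s1[p - m] if n1 > n2 else s2[n2 - 1 - (p - m)]
--
--     return "".join(ch(p) for p in range(n1 + n2))
-- ===== Notes on version B (the rewrite author's own statement) =====
-- stated objective: alternative
-- what changed: Replaces A's sequential indexed loop with per-iteration bounds checks and string += by a closed-form position map: each output index p is sent directly to its source character by index arithmetic (p//2 into s1 or reversed s2 over the interleaved prefix, an offset into the longer string for the tail), joined in one pass over range(len(s1)+len(s2)).
import Mathlib
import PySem

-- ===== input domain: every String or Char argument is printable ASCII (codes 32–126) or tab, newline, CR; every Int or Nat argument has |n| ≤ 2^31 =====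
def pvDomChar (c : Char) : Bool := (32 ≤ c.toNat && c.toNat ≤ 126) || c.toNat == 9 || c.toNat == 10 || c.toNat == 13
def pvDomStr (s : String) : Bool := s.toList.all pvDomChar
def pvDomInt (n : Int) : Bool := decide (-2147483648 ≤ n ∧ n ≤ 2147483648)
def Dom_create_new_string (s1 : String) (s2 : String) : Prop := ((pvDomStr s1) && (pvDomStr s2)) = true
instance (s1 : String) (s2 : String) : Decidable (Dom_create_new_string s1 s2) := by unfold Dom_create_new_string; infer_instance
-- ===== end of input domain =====

-- B replaces A's sequential indexed loop by a closed-form map: each output position p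
-- is sent directly to its source character by index arithmetic (alternative decomposition).

-- ===== PORT A =====
-- for i in range(max_len): if i < len_s1: s3 += s1[i]; if i < len_s2: s3 += s2[-(i+1)]
-- (the guards keep both pyGetD indices in range, so the default ' ' is never used)
def create_new_string (s1 : String) (s2 : String) : String :=
  let l1 := s1.toList
  let l2 := s2.toList
  let len_s1 := l1.length
  let len_s2 := l2.length
  let max_len := max len_s1 len_s2
  let s3 := (PySem.List.pyRange 0 (max_len : Int) 1).foldl (fun s3 i =>
    let s3 := if i < (len_s1 : Int) then s3 ++ [PySem.List.pyGetD l1 i ' '] else s3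
    if i < (len_s2 : Int) then s3 ++ [PySem.List.pyGetD l2 (-(i + 1)) ' '] else s3) []
  String.ofList s3

-- ===== PORT B =====
-- n1, n2 = len(s1), len(s2); m = min(n1, n2)
-- ch(p) = s1[p//2] / s2[n2-1-p//2] for p < 2*m, else the leftover of the longer string;
-- "".join(ch(p) for p in range(n1 + n2))
-- (all indices are nonnegative and in range, so the pyGetD default ' ' is never used)
def create_new_string_alt (s1 : String) (s2 : String) : String :=
  let l1 := s1.toList
  let l2 := s2.toList
  let n1 := (l1.length : Int)
  let n2 := (l2.length : Int)
  let m := min n1 n2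
  let ch := fun (p : Int) =>
    if p < 2 * m then
      if PySem.Int.mod p 2 = 0 then PySem.List.pyGetD l1 (PySem.Int.floordiv p 2) ' '
      else PySem.List.pyGetD l2 (n2 - 1 - PySem.Int.floordiv p 2) ' '
    else if n1 > n2 then PySem.List.pyGetD l1 (p - m) ' '
    else PySem.List.pyGetD l2 (n2 - 1 - (p - m)) ' '
  String.ofList ((PySem.List.pyRange 0 (n1 + n2) 1).map ch)

-- ===== PRECONDITION & SPEC =====
def Spec_create_new_string (s1 : String) (s2 : String) (out : String) : Prop := out = create_new_string_alt s1 s2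
instance (s1 : String) (s2 : String) (out : String) : Decidable (Spec_create_new_string s1 s2 out) := by unfold Spec_create_new_string; infer_instance

-- ===== CLAIM (what is proved, stated in full; the proofs are below) =====
def Claim_equal_create_new_string : Prop := ∀ (s1 : String) (s2 : String), Dom_create_new_string s1 s2 → Spec_create_new_string s1 s2 (create_new_string s1 s2)

-- ===== LEMMAS AND PROOFS =====

-- common reference value: interleave two char lists, dropping the exhausted side
def pvInter : List Char → List Char → List Char
  | [], ys => ys
  | x :: xs, [] => x :: xs
  | x :: xs, y :: ys => x :: y :: pvInter xs ys

theorem pvInter_nil_left (ys : List Char) : pvInter [] ys = ys := by cases ys <;> rfl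

theorem pvInter_nil_right (xs : List Char) : pvInter xs [] = xs := by cases xs <;> rfl

theorem pvInter_length : ∀ (xs ys : List Char), (pvInter xs ys).length = xs.length + ys.length := by
  intro xs
  induction xs with
  | nil => intro ys; simp [pvInter_nil_left]
  | cons x xs ih =>
    intro ys
    cases ys with
    | nil => simp [pvInter_nil_right]
    | cons y ys => simp [pvInter, ih]; omega

-- Nat-level closed form of B's per-position character (ys is the already-reversed second list)
def pvNth (xs ys : List Char) (p : Nat) : Char :=
  let m := min xs.length ys.length
  if p < 2 * m then
    if p % 2 = 0 then xs.getD (p / 2) ' ' else ys.getD (p / 2) ' '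
  else if ys.length < xs.length then xs.getD (p - m) ' ' else ys.getD (p - m) ' '

theorem pvNth_shift (x y : Char) (xs ys : List Char) (q : Nat) :
    pvNth (x :: xs) (y :: ys) (q + 2) = pvNth xs ys q := by
  simp only [pvNth, List.length_cons]
  rw [show min (xs.length + 1) (ys.length + 1) = min xs.length ys.length + 1 by omega]
  by_cases h : q < 2 * min xs.length ys.length
  · rw [if_pos (by omega), if_pos h,
      show (q + 2) % 2 = q % 2 by omega, show (q + 2) / 2 = q / 2 + 1 by omega]
    by_cases he : q % 2 = 0
    · rw [if_pos he, if_pos he, List.getD_cons_succ]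
    · rw [if_neg he, if_neg he, List.getD_cons_succ]
  · rw [if_neg (by omega), if_neg h,
      show q + 2 - (min xs.length ys.length + 1) = (q - min xs.length ys.length) + 1 by omega]
    by_cases hl : ys.length < xs.length
    · rw [if_pos (by omega), if_pos hl, List.getD_cons_succ]
    · rw [if_neg (by omega), if_neg hl, List.getD_cons_succ]

theorem pvInter_getD : ∀ (xs ys : List Char) (p : Nat),
    (pvInter xs ys).getD p ' ' = pvNth xs ys p := by
  intro xs
  induction xs with
  | nil =>
    intro ys p
    simp [pvInter_nil_left, pvNth]
  | cons x xs ih =>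
    intro ys p
    cases ys with
    | nil => simp [pvInter_nil_right, pvNth]
    | cons y ys =>
      match p with
      | 0 =>
        simp only [pvInter, List.getD_cons_zero, pvNth, List.length_cons]
        rw [if_pos (by omega), if_pos (by norm_num)]
        simp
      | 1 =>
        simp only [pvInter, List.getD_cons_succ, List.getD_cons_zero, pvNth, List.length_cons]
        rw [if_pos (by omega), if_neg (by norm_num)]
        simp
      | (q + 2) =>
        simp only [pvInter, List.getD_cons_succ]
        rw [ih ys q, pvNth_shift]

-- B's map over the output range computes pvNth at every position (Int → Nat arithmetic)
theorem pvChB_eq (l1 l2 : List Char) (k : Nat) (hk : k < l1.length + l2.length) :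
    (if (k : Int) < 2 * min (l1.length : Int) (l2.length : Int) then
      if PySem.Int.mod (k : Int) 2 = 0 then PySem.List.pyGetD l1 (PySem.Int.floordiv (k : Int) 2) ' '
      else PySem.List.pyGetD l2 ((l2.length : Int) - 1 - PySem.Int.floordiv (k : Int) 2) ' '
    else if (l1.length : Int) > (l2.length : Int) then
      PySem.List.pyGetD l1 ((k : Int) - min (l1.length : Int) (l2.length : Int)) ' '
    else PySem.List.pyGetD l2 ((l2.length : Int) - 1 - ((k : Int) - min (l1.length : Int) (l2.length : Int))) ' ')
      = pvNth l1 l2.reverse k := by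
  have hmin : min (l1.length : Int) (l2.length : Int) = ((min l1.length l2.length : Nat) : Int) := by
    omega
  have hrev : ∀ (j : Nat), j < l2.length → l2.reverse.getD j ' ' = l2.getD (l2.length - 1 - j) ' ' := by
    intro j hj
    rw [List.getD_eq_getElem _ _ (by simpa using hj), List.getD_eq_getElem _ _ (by omega),
      List.getElem_reverse]
  simp only [pvNth, List.length_reverse, hmin]
  by_cases h : k < 2 * min l1.length l2.length
  · rw [if_pos (by exact_mod_cast h), if_pos h]
    rw [show PySem.Int.mod (k : Int) 2 = ((k % 2 : Nat) : Int) from PySem.Int.mod_natCast k 2,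
      show PySem.Int.floordiv (k : Int) 2 = ((k / 2 : Nat) : Int) from PySem.Int.floordiv_natCast k 2]
    by_cases he : k % 2 = 0
    · rw [if_pos (by exact_mod_cast he), if_pos he, PySem.List.pyGetD_natCast]
    · rw [if_neg (by omega), if_neg he]
      have hlt : k / 2 < l2.length := by omega
      have : (l2.length : Int) - 1 - ((k / 2 : Nat) : Int) = ((l2.length - 1 - k / 2 : Nat) : Int) := by
        omega
      rw [this, PySem.List.pyGetD_natCast, hrev (k / 2) hlt]
  · rw [if_neg (by exact_mod_cast h), if_neg h]
    by_cases hl : l2.length < l1.length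
    · rw [if_pos (by exact_mod_cast hl), if_pos hl]
      have : (k : Int) - ((min l1.length l2.length : Nat) : Int)
          = ((k - min l1.length l2.length : Nat) : Int) := by omega
      rw [this, PySem.List.pyGetD_natCast]
    · rw [if_neg (by omega), if_neg hl]
      have hlt : k - min l1.length l2.length < l2.length := by omega
      have : (l2.length : Int) - 1 - ((k : Int) - ((min l1.length l2.length : Nat) : Int))
          = ((l2.length - 1 - (k - min l1.length l2.length) : Nat) : Int) := by omega
      rw [this, PySem.List.pyGetD_natCast, hrev _ hlt]

-- one step of pvInter: peel the (at most one) head of each side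
theorem pvInter_step (us vs : List Char) :
    pvInter us vs = us.take 1 ++ vs.take 1 ++ pvInter (us.drop 1) (vs.drop 1) := by
  cases us <;> cases vs <;> simp [pvInter, pvInter_nil_left, pvInter_nil_right]

-- A's loop from index j onward appends pvInter of the suffixes of l1 and reversed l2
theorem pvLoopA (l1 l2 : List Char) :
    ∀ (m j : Nat), max l1.length l2.length = j + m → ∀ (acc : List Char),
    (PySem.List.pyRange (j : Int) ((max l1.length l2.length : Nat) : Int) 1).foldl
      (fun s3 i =>
        if i < (l2.length : Int) then
          (if i < (l1.length : Int) then s3 ++ [PySem.List.pyGetD l1 i ' '] else s3)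
            ++ [PySem.List.pyGetD l2 (-(i + 1)) ' ']
        else if i < (l1.length : Int) then s3 ++ [PySem.List.pyGetD l1 i ' '] else s3) acc
      = acc ++ pvInter (l1.drop j) (l2.reverse.drop j) := by
  intro m
  induction m with
  | zero =>
    intro j hj acc
    rw [PySem.List.pyRange_one_eq_nil (by omega)]
    have h1 : l1.drop j = [] := List.drop_eq_nil_of_le (by omega)
    have h2 : l2.reverse.drop j = [] := List.drop_eq_nil_of_le (by simp; omega)
    simp [h1, h2, pvInter]
  | succ m ih =>
    intro j hj acc
    have hjlt : j < max l1.length l2.length := by omega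
    rw [PySem.List.pyRange_one_cons (by exact_mod_cast hjlt)]
    simp only [List.foldl_cons]
    have hstep : ((j : Int) + 1) = ((j + 1 : Nat) : Int) := by push_cast; ring
    rw [hstep, ih (j + 1) (by omega)]
    rw [pvInter_step (l1.drop j) (l2.reverse.drop j)]
    simp only [List.drop_drop]
    have a1 : ∀ h1 : j < l1.length,
        (l1.drop j).take 1 = [PySem.List.pyGetD l1 (j : Int) ' '] := by
      intro h1
      rw [PySem.List.pyGetD_natCast l1 j ' ', List.getD_eq_getElem l1 ' ' h1,
        List.drop_eq_getElem_cons h1]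
      rfl
    have a2 : ∀ h2 : j < l2.length,
        (l2.reverse.drop j).take 1 = [PySem.List.pyGetD l2 (-((j + 1 : Nat) : Int)) ' '] := by
      intro h2
      rw [List.drop_eq_getElem_cons (l := l2.reverse) (by simpa using h2),
        PySem.List.pyGetD_neg_natCast l2 (j + 1) ' ' (by omega) (by omega)]
      simp [List.getElem_reverse]
      congr 1
      omega
    by_cases h1 : j < l1.length <;> by_cases h2 : j < l2.length
    · rw [if_pos (by exact_mod_cast h2), if_pos (by exact_mod_cast h1), a1 h1, a2 h2]
      simp
    · rw [if_neg (by exact_mod_cast h2), if_pos (by exact_mod_cast h1), a1 h1,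
        List.take_eq_nil_of_eq_nil (List.drop_eq_nil_of_le (by simp; omega))]
      simp
    · rw [if_pos (by exact_mod_cast h2), if_neg (by exact_mod_cast h1), a2 h2,
        List.take_eq_nil_of_eq_nil (List.drop_eq_nil_of_le (by omega))]
      simp
    · omega

-- B's closed-form map equals the reference interleave
theorem pvB_eq_inter (l1 l2 : List Char) :
    ((PySem.List.pyRange 0 ((l1.length : Int) + (l2.length : Int)) 1).map (fun p =>
      if p < 2 * min (l1.length : Int) (l2.length : Int) then
        if PySem.Int.mod p 2 = 0 then PySem.List.pyGetD l1 (PySem.Int.floordiv p 2) ' '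
        else PySem.List.pyGetD l2 ((l2.length : Int) - 1 - PySem.Int.floordiv p 2) ' '
      else if (l1.length : Int) > (l2.length : Int) then
        PySem.List.pyGetD l1 (p - min (l1.length : Int) (l2.length : Int)) ' '
      else PySem.List.pyGetD l2 ((l2.length : Int) - 1 - (p - min (l1.length : Int) (l2.length : Int))) ' ')
      = pvInter l1 l2.reverse) := by
  have hcast : (l1.length : Int) + (l2.length : Int) = ((l1.length + l2.length : Nat) : Int) := by
    push_cast; ring
  rw [hcast]
  apply List.ext_getElem
  · simp only [List.length_map, PySem.List.length_pyRange_one, pvInter_length,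
      List.length_reverse]
    omega
  · intro k hk1 hk2
    have hklt : k < l1.length + l2.length := by
      simp only [List.length_map, PySem.List.length_pyRange_one] at hk1
      omega
    rw [List.getElem_map]
    rw [PySem.List.getElem_pyRange_one]
    have hgd : (pvInter l1 l2.reverse)[k] = (pvInter l1 l2.reverse).getD k ' ' := by
      rw [List.getD_eq_getElem _ _ (by rw [pvInter_length]; simpa using hklt)]
    rw [hgd, pvInter_getD]
    simpa using pvChB_eq l1 l2 k hklt

-- ===== VERDICT (by name: the statement is the Claim_ definition above) =====
theorem create_new_string_spec : Claim_equal_create_new_string := by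
  intro s1 s2 _
  unfold Spec_create_new_string create_new_string create_new_string_alt
  have hA := pvLoopA s1.toList s2.toList (max s1.toList.length s2.toList.length) 0 (by omega) []
  simp only [Nat.cast_zero, List.drop_zero, List.nil_append] at hA
  simp only [hA]
  rw [pvB_eq_inter s1.toList s2.toList]
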